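-- pv_equiv track=rewrite | github.com/seashark97/Sentiment-heat-map-generator | process.py | negate_gram
-- ===== SOURCE A (Python) =====
-- def negate_gram(document):
--     doclist = document.split()
--     review = []
--     negated = False
--     for n in range(len(doclist)):
--         if doclist[n] == 'not' and not negated and len(doclist)>n+1:
--             review.append(doclist[n]+'_'+doclist[n+1])
--             negated = True
--         elif not negated:
--             review.append(doclist[n])
--         elif negated:
--             negated = False
--     return ' '.join(review)
-- ===== SOURCE B (Python) =====
-- def negate_gram(document):
--     it = iter(document.split())
--     review = []
--     for w in it:
--         if w == 'not':
--             nxt = next(it, None)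
--             review.append(w if nxt is None else w + '_' + nxt)
--         else:
--             review.append(w)
--     return ' '.join(review)
-- ===== Notes on version B (the rewrite author's own statement) =====
-- stated objective: idiomatic
-- what changed: Replaces A's negated-flag state machine indexing every position of the list with an iterator-consuming loop: on seeing 'not' it pulls the next token directly from the iterator with next(), so no index arithmetic and no flag state remain.
import Mathlib
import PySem

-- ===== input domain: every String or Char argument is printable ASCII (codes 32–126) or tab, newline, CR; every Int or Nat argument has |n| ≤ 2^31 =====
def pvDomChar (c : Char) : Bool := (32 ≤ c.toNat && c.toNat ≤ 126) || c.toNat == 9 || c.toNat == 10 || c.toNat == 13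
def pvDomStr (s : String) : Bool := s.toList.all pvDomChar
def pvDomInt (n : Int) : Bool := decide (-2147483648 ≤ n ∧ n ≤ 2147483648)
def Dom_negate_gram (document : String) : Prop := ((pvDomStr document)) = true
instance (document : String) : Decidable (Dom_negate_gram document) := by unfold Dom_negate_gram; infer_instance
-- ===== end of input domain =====

-- B replaces A's negated-flag state machine indexing every position by an
-- iterator-consuming loop that pulls the next token with next() on 'not';
-- objective: idiomatic (no index arithmetic, no flag state).

-- ===== PORT A =====
-- the for-n-in-range loop with state (review, negated); fuel = ws.length bounds the
-- iteration count (a totality guard only); doclist[n] is always in range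
-- (0 ≤ n < len), so List.getD is exact for Python's doclist[n] here
def negGramLoopA (ws : List String) (fuel n : Nat) (review : List String) (negated : Bool) :
    List String :=
  match fuel with
  | 0 => review
  | f + 1 =>
    if n < ws.length then
      if ws.getD n "" = "not" ∧ negated = false ∧ ws.length > n + 1 then
        negGramLoopA ws f (n + 1) (review ++ [ws.getD n "" ++ "_" ++ ws.getD (n + 1) ""]) true
      else if negated = false then
        negGramLoopA ws f (n + 1) (review ++ [ws.getD n ""]) false
      else
        negGramLoopA ws f (n + 1) review false
    else review

def negate_gram (document : String) : String :=
  PySem.Str.join " " (negGramLoopA (PySem.Str.split₀ document)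
    (PySem.Str.split₀ document).length 0 [] false)

-- ===== PORT B =====
-- the for-w-in-it loop consuming an iterator: a 'for' over an iterator is exactly
-- structural recursion on the remaining token list; on 'not', next(it, None) is the
-- head of the remainder (none when it is empty)
def negGramB : List String → List String
  | [] => []
  | w :: rest =>
    if w = "not" then
      match rest with
      | [] => [w]                                   -- next(it, None) returned None
      | nxt :: rest' => (w ++ "_" ++ nxt) :: negGramB rest'
    else w :: negGramB rest

def negate_gram_alt (document : String) : String :=
  PySem.Str.join " " (negGramB (PySem.Str.split₀ document))

-- ===== PRECONDITION & SPEC =====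
def Spec_negate_gram (document : String) (out : String) : Prop := out = negate_gram_alt document
instance (document : String) (out : String) : Decidable (Spec_negate_gram document out) := by unfold Spec_negate_gram; infer_instance

-- ===== CLAIM (what is proved, stated in full; the proofs are below) =====
def Claim_equal_negate_gram : Prop := ∀ (document : String), Dom_negate_gram document → Spec_negate_gram document (negate_gram document)

-- ===== LEMMAS AND PROOFS =====

-- past the end, A returns the accumulator whatever the fuel and flag
theorem negGramLoopA_stop (ws : List String) (fuel n : Nat) (review : List String)
    (negated : Bool) (h : ¬ n < ws.length) :
    negGramLoopA ws fuel n review negated = review := by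
  cases fuel <;> simp [negGramLoopA, h]

-- with the flag set, A skips exactly one token and clears the flag
theorem negGramLoopA_true (ws : List String) (f n : Nat) (review : List String)
    (h : n < ws.length) :
    negGramLoopA ws (f + 1) n review true = negGramLoopA ws f (n + 1) review false := by
  simp [negGramLoopA, h]

-- with the flag clear and enough fuel, A's indexed scan from position n produces the
-- accumulator followed by B's recursion over the remaining tokens
theorem negGramLoopA_eq_B (ws : List String) :
    ∀ (fuel n : Nat) (review : List String),
      ws.length - n ≤ fuel →
      negGramLoopA ws fuel n review false = review ++ negGramB (ws.drop n) := by
  intro fuel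
  induction fuel using Nat.strong_induction_on with
  | _ fuel ih =>
    intro n review hf
    by_cases h : n < ws.length
    · obtain ⟨f, rfl⟩ : ∃ k, fuel = k + 1 := ⟨fuel - 1, by omega⟩
      rw [negGramLoopA, if_pos h]
      rw [List.drop_eq_getElem_cons h]
      by_cases hm : ws.getD n "" = "not" ∧ n + 1 < ws.length
      · obtain ⟨f', rfl⟩ : ∃ k, f = k + 1 := ⟨f - 1, by omega⟩
        rw [if_pos ⟨hm.1, rfl, hm.2⟩, negGramLoopA_true ws f' (n + 1) _ hm.2,
          ih f' (by omega) (n + 2) _ (by omega)]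
        rw [List.drop_eq_getElem_cons hm.2]
        have hg : ws[n] = "not" := by
          rw [← List.getD_eq_getElem ws "" h]; exact hm.1
        simp [negGramB, hg, List.getElem?_eq_getElem h, List.getElem?_eq_getElem hm.2,
          List.append_assoc]
      · rw [if_neg (fun hc => hm ⟨hc.1, hc.2.2⟩), if_pos rfl,
          ih f (by omega) (n + 1) _ (by omega)]
        by_cases hnot : ws[n] = "not"
        · have hlen : ¬ n + 1 < ws.length := by
            intro hc; exact hm ⟨by rw [List.getD_eq_getElem ws "" h]; exact hnot, hc⟩
          have hdrop : ws.drop (n + 1) = [] := by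
            apply List.drop_eq_nil_of_le; omega
          simp [negGramB, hnot, hdrop, List.getElem?_eq_getElem h]
        · simp only [List.getD, List.getElem?_eq_getElem h, Option.getD_some, List.append_assoc]
          cases ws.drop (n + 1) <;> simp [negGramB, hnot]
    · rw [negGramLoopA_stop ws _ _ _ _ h, List.drop_eq_nil_of_le (by omega)]
      simp [negGramB]

-- ===== VERDICT (by name: the statement is the Claim_ definition above) =====
theorem negate_gram_spec : Claim_equal_negate_gram := by
  intro document _
  unfold Spec_negate_gram negate_gram negate_gram_alt
  rw [negGramLoopA_eq_B (PySem.Str.split₀ document) (PySem.Str.split₀ document).length 0 []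
    (by omega)]
  simp
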